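-- pv_equiv track=rewrite | github.com/Cristhianals/python-funcoes-praticas | funcao-pesquisa-em-lista/funcao-pesquisa-em-lista.py | pesquisa
-- ===== SOURCE A (Python) =====
-- def pesquisa(l,valor):
--     resultado = []
--     for i,x in enumerate(l):
--         p = 0
--         while p > -1:
--             p = x.find(valor,p)
--             if p >=0:
--                 resultado.append(f"l[{i}][{p}]")
--                 p +=1
--     if not resultado == []:
--         return f"{valor} foi encontrado nas posicoes: " + ",".join(resultado)
--     else:
--         return f"{valor} nao foi encontrado"
-- ===== SOURCE B (Python) =====
-- def pesquisa(l, valor):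
--     resultado = []
--     for i, x in enumerate(l):
--         for p in range(len(x) - len(valor) + 1):
--             if x[p:p + len(valor)] == valor:
--                 resultado.append(f"l[{i}][{p}]")
--     if resultado:
--         return f"{valor} foi encontrado nas posicoes: " + ",".join(resultado)
--     else:
--         return f"{valor} nao foi encontrado"
-- ===== Notes on version B (the rewrite author's own statement) =====
-- stated objective: simpler
-- what changed: Replaces the stateful while/str.find jumping search (restart position maintained across iterations, sentinel -1 exit) with a plain bounded for-loop that tests every candidate start position by slice comparison; range(len(x)-len(valor)+1) reproduces find's empty-needle and too-long-needle boundaries.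
import Mathlib
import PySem

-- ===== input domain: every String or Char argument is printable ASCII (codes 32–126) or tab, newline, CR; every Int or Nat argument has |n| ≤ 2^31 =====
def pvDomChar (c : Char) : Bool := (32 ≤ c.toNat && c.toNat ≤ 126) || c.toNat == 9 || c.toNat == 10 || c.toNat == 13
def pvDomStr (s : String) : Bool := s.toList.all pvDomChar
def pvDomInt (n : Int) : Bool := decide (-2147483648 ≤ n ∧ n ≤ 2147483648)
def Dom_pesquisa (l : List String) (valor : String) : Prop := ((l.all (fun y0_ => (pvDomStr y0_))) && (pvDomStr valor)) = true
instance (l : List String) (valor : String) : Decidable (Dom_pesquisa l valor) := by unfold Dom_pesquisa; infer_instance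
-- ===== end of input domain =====

-- B replaces A's stateful while/str.find jumping search with a bounded for-loop testing each
-- candidate start position by slice comparison (objective: simpler); same return value everywhere.

-- ===== PORT A =====
-- shared formatting helper: both Pythons build the very same f-string "l[{i}][{p}]"
def pvFmt (i p : Int) : String := "l[" ++ PySem.Int.toStr i ++ "][" ++ PySem.Int.toStr p ++ "]"

-- inner while-loop of A: p = x.find(valor, p); if p >= 0: append; p += 1  (loop exits when p == -1).
-- The fuel argument only totalizes the while-loop: len(x) + 2 steps always suffice (each continuing
-- iteration strictly increases p, which stays ≤ len(x) + 1), so the loop is never cut short.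
def pesquisaInner (x valor : String) (i : Int) (fuel : Nat) (p : Int) (acc : List String) : List String :=
  match fuel with
  | 0 => acc
  | fuel + 1 =>
    if p > -1 then
      if PySem.Str.findFrom x valor p none ≥ 0 then
        pesquisaInner x valor i fuel (PySem.Str.findFrom x valor p none + 1)
          (acc ++ [pvFmt i (PySem.Str.findFrom x valor p none)])
      else acc
    else acc

def pesquisa (l : List String) (valor : String) : String :=
  let resultado := (PySem.List.enumerate l 0).foldl
    (fun acc ix => pesquisaInner ix.2 valor ix.1 (ix.2.toList.length + 2) 0 acc) []
  if !(resultado == []) then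
    valor ++ " foi encontrado nas posicoes: " ++ PySem.Str.join "," resultado
  else
    valor ++ " nao foi encontrado"

-- ===== PORT B =====
-- inner for-loop of B: for p in range(len(x) - len(valor) + 1): if x[p:p+len(valor)] == valor: append
def pvScanLine (x valor : String) (i : Int) (acc : List String) : List String :=
  (PySem.List.pyRange 0 (PySem.Str.len x - PySem.Str.len valor + 1) 1).foldl
    (fun acc p =>
      if PySem.Str.slice x (some p) (some (p + PySem.Str.len valor)) == valor then
        acc ++ [pvFmt i p]
      else acc) acc

def pesquisa_alt (l : List String) (valor : String) : String :=
  let resultado := (PySem.List.enumerate l 0).foldl (fun acc ix => pvScanLine ix.2 valor ix.1 acc) []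
  if resultado ≠ [] then
    valor ++ " foi encontrado nas posicoes: " ++ PySem.Str.join "," resultado
  else
    valor ++ " nao foi encontrado"

-- ===== PRECONDITION & SPEC =====
def Spec_pesquisa (l : List String) (valor : String) (out : String) : Prop := out = pesquisa_alt l valor
instance (l : List String) (valor : String) (out : String) : Decidable (Spec_pesquisa l valor out) := by unfold Spec_pesquisa; infer_instance

-- ===== CLAIM (what is proved, stated in full; the proofs are below) =====
def Claim_equal_pesquisa : Prop := ∀ (l : List String) (valor : String), Dom_pesquisa l valor → Spec_pesquisa l valor (pesquisa l valor)

-- ===== LEMMAS AND PROOFS =====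

-- str.find(sub, start) returns -1 when start is past len(s) (the CPython quirk kept by PySem)
theorem pvFindFrom_pastLen (s sub : List Char) (p : Int) (h : (s.length : Int) < p) :
    PySem.Chars.findFrom s sub p none = -1 := by
  simp only [PySem.Chars.findFrom]
  split_ifs <;> omega


-- Both inner loops produce exactly the occurrence positions p ∈ [0, len x] with valor a prefix of x[p:].
theorem pvInner_eq (x valor : String) (i : Int) (fuel : Nat) :
    ∀ (k : Nat), k ≤ x.toList.length + 1 → x.toList.length + 2 ≤ fuel + k →
    ∀ (acc : List String),
    pesquisaInner x valor i fuel (k : Int) acc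
      = acc ++ ((PySem.List.pyRange (k : Int) ((x.toList.length : Int) + 1) 1).filter
          (fun p => decide (valor.toList <+: x.toList.drop p.toNat))).map (pvFmt i) := by
  induction fuel with
  | zero => intro k hk hf acc; exact absurd hf (by omega)
  | succ fuel ih =>
    intro k hk hf acc
    rw [pesquisaInner]
    rw [if_pos (by omega : (k : Int) > -1)]
    simp only [PySem.Str.findFrom_eq]
    by_cases hk' : k ≤ x.toList.length
    · rw [PySem.Chars.findFrom_natCast x.toList valor.toList k hk']
      by_cases hf1 : PySem.Chars.find (x.toList.drop k) valor.toList = -1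
      · rw [if_pos hf1, if_neg (by omega)]
        have hno : ¬ valor.toList <:+: x.toList.drop k :=
          (PySem.Chars.find_eq_neg_one_iff _ _).mp hf1
        have hfil : (PySem.List.pyRange (k : Int) ((x.toList.length : Int) + 1) 1).filter
            (fun p => decide (valor.toList <+: x.toList.drop p.toNat)) = [] := by
          rw [List.filter_eq_nil_iff]
          intro p hp
          rw [PySem.List.mem_pyRange_one] at hp
          simp only [decide_eq_true_eq]
          intro hpre
          apply hno
          have hdd : x.toList.drop p.toNat = (x.toList.drop k).drop (p.toNat - k) := by
            rw [List.drop_drop]; congr 1; omega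
          rw [hdd] at hpre
          exact (PySem.Chars.isIn_iff_infix _ _).mp
            ((PySem.Chars.exists_prefix_drop_iff_isIn valor.toList (x.toList.drop k)).mp ⟨_, hpre⟩)
        rw [hfil]; simp
      · have h0 : (0:Int) ≤ PySem.Chars.find (x.toList.drop k) valor.toList := by
          have := PySem.Chars.neg_one_le_find (x.toList.drop k) valor.toList; omega
        have hle := PySem.Chars.find_le_length (x.toList.drop k) valor.toList
        rw [List.length_drop] at hle
        set f := PySem.Chars.find (x.toList.drop k) valor.toList with hfdef
        obtain ⟨hpre, hmin⟩ := PySem.Chars.find_spec (s := x.toList.drop k) (sub := valor.toList) h0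
        rw [List.drop_drop] at hpre
        rw [if_neg hf1, if_pos (by omega : (k : Int) + f ≥ 0)]
        have hcast1 : (k : Int) + f + 1 = ((k + f.toNat + 1 : Nat) : Int) := by push_cast; omega
        rw [hcast1, ih (k + f.toNat + 1) (by omega) (by omega)]
        rw [PySem.List.pyRange_one_append (k : Int) ((k : Int) + f) ((x.toList.length : Int) + 1)
          (by omega) (by omega)]
        rw [PySem.List.pyRange_one_cons (by omega : (k : Int) + f < (x.toList.length : Int) + 1)]
        rw [List.filter_append, List.filter_cons]
        have hqt : ((k : Int) + f).toNat = k + f.toNat := by omega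
        have hptrue : (decide (valor.toList <+: x.toList.drop ((k : Int) + f).toNat)) = true := by
          rw [hqt]; simpa [Nat.add_comm] using hpre
        rw [hptrue]
        have hfil0 : (PySem.List.pyRange (k : Int) ((k : Int) + f) 1).filter
            (fun p => decide (valor.toList <+: x.toList.drop p.toNat)) = [] := by
          rw [List.filter_eq_nil_iff]
          intro p hp
          rw [PySem.List.mem_pyRange_one] at hp
          simp only [decide_eq_true_eq]
          intro hpre'
          apply hmin (p.toNat - k) (by omega)
          rw [List.drop_drop]
          have hix : k + (p.toNat - k) = p.toNat := by omega
          rw [hix]; exact hpre'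
        rw [hfil0]
        have hcast2 : ((k + f.toNat + 1 : Nat) : Int) = (k : Int) + f + 1 := by push_cast; omega
        rw [hcast2]
        simp
    · have hpast : PySem.Chars.findFrom x.toList valor.toList (k : Int) none = -1 :=
        pvFindFrom_pastLen _ _ _ (by omega)
      rw [hpast, if_neg (by omega)]
      rw [PySem.List.pyRange_one_eq_nil (by omega : (x.toList.length : Int) + 1 ≤ (k : Int))]
      simp

theorem pvScan_eq (x valor : String) (i : Int) (acc : List String) :
    pvScanLine x valor i acc
      = acc ++ ((PySem.List.pyRange 0 ((x.toList.length : Int) + 1) 1).filter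
          (fun p => decide (valor.toList <+: x.toList.drop p.toNat))).map (pvFmt i) := by
  unfold pvScanLine
  have hlen : PySem.Str.len x = (x.toList.length : Int) := rfl
  have hlenv : PySem.Str.len valor = (valor.toList.length : Int) := rfl
  rw [PySem.List.foldl_congr_mem _ _
    (fun a p => if decide (valor.toList <+: x.toList.drop p.toNat) then a ++ [pvFmt i p] else a) acc
    ?_]
  · rw [PySem.List.foldl_append_if]
    rw [hlen, hlenv]
    by_cases hK : (x.toList.length : Int) - valor.toList.length + 1 ≤ 0
    · rw [PySem.List.pyRange_one_eq_nil hK]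
      have hfil : (PySem.List.pyRange 0 ((x.toList.length : Int) + 1) 1).filter
          (fun p => decide (valor.toList <+: x.toList.drop p.toNat)) = [] := by
        rw [List.filter_eq_nil_iff]
        intro p hp
        simp only [decide_eq_true_eq]
        intro hpre
        have := hpre.length_le
        rw [List.length_drop] at this
        omega
      rw [hfil]; simp
    · rw [PySem.List.pyRange_one_append 0 ((x.toList.length : Int) - valor.toList.length + 1)
        ((x.toList.length : Int) + 1) (by omega) (by omega), List.filter_append]
      have hfil : (PySem.List.pyRange ((x.toList.length : Int) - valor.toList.length + 1)
          ((x.toList.length : Int) + 1) 1).filter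
          (fun p => decide (valor.toList <+: x.toList.drop p.toNat)) = [] := by
        rw [List.filter_eq_nil_iff]
        intro p hp
        rw [PySem.List.mem_pyRange_one] at hp
        simp only [decide_eq_true_eq]
        intro hpre
        have := hpre.length_le
        rw [List.length_drop] at this
        omega
      rw [hfil]; simp
  · intro a p hp
    rw [PySem.List.mem_pyRange_one] at hp
    have hp0 : (0:Int) ≤ p := hp.1
    have hm : (p + PySem.Str.len valor).toNat - p.toNat = valor.toList.length := by
      rw [hlenv]; omega
    have hslice : (PySem.Str.slice x (some p) (some (p + PySem.Str.len valor))).toList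
        = (x.toList.drop p.toNat).take valor.toList.length := by
      rw [PySem.Str.toList_slice, PySem.Chars.slice_eq_listSlice,
        PySem.List.slice_toNat x.toList hp0 (by rw [hlenv]; omega), hm]
    have hiff : PySem.Str.slice x (some p) (some (p + PySem.Str.len valor)) = valor
        ↔ valor.toList <+: x.toList.drop p.toNat := by
      constructor
      · intro heq
        rw [List.prefix_iff_eq_take]
        have := congrArg String.toList heq
        rw [hslice] at this
        exact this.symm
      · intro hc
        apply String.ext
        rw [hslice]
        exact (List.prefix_iff_eq_take.mp hc).symm
    have hcond : (PySem.Str.slice x (some p) (some (p + PySem.Str.len valor)) == valor)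
        = decide (valor.toList <+: x.toList.drop p.toNat) := by
      rw [Bool.eq_iff_iff]
      simp only [beq_iff_eq, decide_eq_true_eq]
      exact hiff
    show (if PySem.Str.slice x (some p) (some (p + PySem.Str.len valor)) == valor
        then a ++ [pvFmt i p] else a)
      = if decide (valor.toList <+: x.toList.drop p.toNat) then a ++ [pvFmt i p] else a
    rw [hcond]

-- ===== VERDICT (by name: the statement is the Claim_ definition above) =====
theorem pesquisa_spec : Claim_equal_pesquisa := by
  intro l valor _
  unfold Spec_pesquisa pesquisa pesquisa_alt
  have hin : ∀ (i : Int) (x : String) (acc : List String),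
      pesquisaInner x valor i (x.toList.length + 2) 0 acc = pvScanLine x valor i acc := by
    intro i x acc
    rw [show (0 : Int) = ((0 : Nat) : Int) from rfl,
      pvInner_eq x valor i (x.toList.length + 2) 0 (by omega) (by omega), pvScan_eq]
    norm_cast
  simp only [hin]
  generalize (PySem.List.enumerate l 0).foldl (fun acc ix => pvScanLine ix.2 valor ix.1 acc) ([] : List String) = r
  cases r <;> simp
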